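-- pv_equiv track=rewrite | github.com/PrinceSinghhub/GFG-Questions | Minimum times A has to be repeated such that B is a substring of it1.py | minRepeats
-- ===== SOURCE A (Python) =====
-- def minRepeats(a, b):
--     ans = 0
--     j = 0
--     i = 0
--     for i in range(len(a)):
--         if (b[0] == a[i]):
--             break
--     if (i == len(a)): return -1
--     while (j < len(b)):
--         if (i == len(a)):
--             ans += 1
--             i = 0
--         if (a[i] != b[j]):
--             return -1
--         if (a[i] == b[j]):
--             i += 1
--             j += 1
--     return ans + 1
-- ===== SOURCE B (Python) =====
-- def minRepeats(a, b):
--     if not a: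
--         return -1
--     s = a.find(b[0])
--     if s < 0:
--         return -1
--     reps = -(-(s + len(b)) // len(a))
--     if (a * reps)[s:s + len(b)] != b:
--         return -1
--     return reps
-- ===== Notes on version B (the rewrite author's own statement) =====
-- stated objective: simpler
-- what changed: B has no character loop at all: it locates b[0] with str.find, computes the repeat count in closed form by ceiling division -(-(s+len(b))//len(a)), builds the repeated string once and decides the match with a single slice comparison (a*reps)[s:s+len(b)] == b, where A simulates the cyclic walk character by character with a resetting index and a wrap counter; inputs with b == '' and a != '' are excluded by Pre_ because A (and B) raise IndexError on b[0] there.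
import Mathlib
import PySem

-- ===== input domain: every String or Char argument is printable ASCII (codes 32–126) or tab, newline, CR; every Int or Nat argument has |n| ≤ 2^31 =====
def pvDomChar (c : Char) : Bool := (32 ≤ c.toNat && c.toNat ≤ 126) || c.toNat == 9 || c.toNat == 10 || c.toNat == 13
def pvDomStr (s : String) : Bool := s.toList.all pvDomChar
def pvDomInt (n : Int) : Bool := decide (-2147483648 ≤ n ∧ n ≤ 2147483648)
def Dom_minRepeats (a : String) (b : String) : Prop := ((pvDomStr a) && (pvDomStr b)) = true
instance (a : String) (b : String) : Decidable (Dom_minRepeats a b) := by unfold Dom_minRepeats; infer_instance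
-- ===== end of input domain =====

-- B replaces A's character-by-character wrap-around simulation by find + a ceiling-division
-- repeat count + one slice comparison against the repeated string (objective: simpler).

-- ===== PORT A =====
-- Python's `for i in range(len(a)): if b[0] == a[i]: break`: i ends at the first match,
-- at len(a)-1 if the loop runs out, at its initial 0 if a is empty.  b[0] is passed as
-- an Option Char (none = IndexError on empty b; that input is outside Pre_minRepeats).
def pvScanA (b0 : Option Char) : List Char → Nat → Nat
  | [], i => i
  | c :: rest, i =>
    if b0 == some c then i
    else match rest with
      | [] => i
      | _ :: _ => pvScanA b0 rest (i + 1)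

-- Python's `while (j < len(b))` body, step for step: wrap i and bump ans, compare, advance.
def pvWhileA (al bl : List Char) (ans i j : Nat) : Int :=
  if _h : j < bl.length then
    let ans' := if i == al.length then ans + 1 else ans
    let i' := if i == al.length then 0 else i
    match al[i']?, bl[j]? with
    | some ai, some bj =>
        if ai != bj then -1
        else pvWhileA al bl ans' (i' + 1) (j + 1)
    | _, _ => -1   -- unreachable: i' < al.length and j < bl.length whenever this loop runs
  else (ans : Int) + 1
termination_by bl.length - j

def minRepeats (a : String) (b : String) : Int :=
  let al := a.toList
  let i := pvScanA (PySem.Str.pyGet? b 0) al 0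
  if i == al.length then -1
  else pvWhileA al b.toList 0 i 0

-- ===== PORT B =====
-- Source B, line for line: empty-a guard; s = a.find(b[0]); ceiling repeat count
-- reps = -(-(s+len(b)) // len(a)); one slice comparison (a*reps)[s:s+len(b)] == b.
def minRepeats_alt (a : String) (b : String) : Int :=
  if a.toList.isEmpty then -1
  else
    match PySem.Str.pyGet? b 0 with
    | none => -1   -- b[0] raises IndexError in Python; outside Pre_minRepeats
    | some c =>
      let s : Int := PySem.Str.find a (String.singleton c)
      if s < 0 then -1
      else
        let reps : Int := -(PySem.Int.floordiv (-(s + PySem.Str.len b)) (PySem.Str.len a))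
        let t := (List.replicate reps.toNat a.toList).flatten
        if PySem.List.slice t (some s) (some (s + PySem.Str.len b)) == b.toList then reps
        else -1

-- ===== PRECONDITION & SPEC =====
-- Pre_ excludes exactly b = "" with a ≠ "", where the Python A (and B alike) raises
-- IndexError on b[0]; A returns normally on every other input.
def Pre_minRepeats (a : String) (b : String) : Prop := a.toList = [] ∨ b.toList ≠ []
instance (a : String) (b : String) : Decidable (Pre_minRepeats a b) := by
  unfold Pre_minRepeats; infer_instance

def pvWitness_minRepeats : String × String := ("abc", "cabca")

def Spec_minRepeats (a : String) (b : String) (out : Int) : Prop := out = minRepeats_alt a b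
instance (a : String) (b : String) (out : Int) : Decidable (Spec_minRepeats a b out) := by
  unfold Spec_minRepeats; infer_instance

-- ===== CLAIM (what is proved, stated in full; the proofs are below) =====
def Claim_equal_minRepeats : Prop := ∀ (a : String) (b : String),
  Dom_minRepeats a b → Pre_minRepeats a b → Spec_minRepeats a b (minRepeats a b)

-- ===== LEMMAS AND PROOFS =====

-- Proof-side intermediates: the first index of al holding b0 (len-1 if none), and the
-- modular comparison predicate; A and B are each related to these.
def pvFindB (al : List Char) (b0 : Option Char) : Nat :=
  match al.findIdx? (fun c => b0 == some c) with
  | some k => k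
  | none => al.length - 1

def pvCheckB (al : List Char) (s : Nat) : List Char → Nat → Bool
  | [], _ => true
  | c :: rest, k =>
      al.getD ((s + k) % al.length) c == c && pvCheckB al s rest (k + 1)

-- A's first-occurrence scan equals findIdx?-with-default, shifted by the start index.
theorem pvScanA_eq_find (b0 : Option Char) (al : List Char) (hal : al ≠ []) :
    ∀ i, pvScanA b0 al i = i + pvFindB al b0 := by
  induction al with
  | nil => exact absurd rfl hal
  | cons c rest ih =>
    intro i
    by_cases hc : b0 = some c
    · simp [pvScanA, pvFindB, hc, List.findIdx?_cons]
    · cases rest with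
      | nil => simp [pvScanA, pvFindB, hc, List.findIdx?_cons]
      | cons d rs =>
        have hstep : pvScanA b0 (c :: d :: rs) i = pvScanA b0 (d :: rs) (i + 1) := by
          simp [pvScanA, hc]
        rw [hstep, ih (by simp) (i + 1)]
        have hfind : pvFindB (c :: d :: rs) b0 = pvFindB (d :: rs) b0 + 1 := by
          cases hfi : List.findIdx? (fun x => b0 == some x) (d :: rs) with
          | none => simp [pvFindB, List.findIdx?_cons, hc, hfi]
          | some k => simp [pvFindB, List.findIdx?_cons, hc, hfi]
        rw [hfind]; omega

theorem pvFindB_lt (al : List Char) (hal : al ≠ []) (b0 : Option Char) :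
    pvFindB al b0 < al.length := by
  have hL : 0 < al.length := List.length_pos_iff.mpr hal
  unfold pvFindB
  cases hfi : al.findIdx? (fun c => b0 == some c) with
  | none => simp; omega
  | some k => exact (List.findIdx?_eq_some_iff_findIdx_eq.mp hfi).1

-- The core invariant: A's while loop from state (ans, i, j) with i + ans·L = s + j equals
-- the modular check on the rest of b followed by the closed-form count.
theorem pvWhileA_eq (al bl : List Char) (s : Nat) (hal : al ≠ []) (hs : s < al.length) :
    ∀ j ans i, i + ans * al.length = s + j → i ≤ al.length → j ≤ bl.length →
      ((1 ≤ i) ∨ (j = 0 ∧ ans = 0 ∧ i = s)) →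
      pvWhileA al bl ans i j =
        if pvCheckB al s (bl.drop j) j then (((s + bl.length - 1) / al.length + 1 : Nat) : Int)
        else (-1 : Int) := by
  intro j
  induction hn : bl.length - j using Nat.strong_induction_on generalizing j with
  | _ n ihn =>
  intro ans i hinv hile hjle hstart
  have hL : 0 < al.length := List.length_pos_iff.mpr hal
  by_cases hj : j < bl.length
  · -- loop body
    have hdrop : bl.drop j = bl[j] :: bl.drop (j + 1) := (List.getElem_cons_drop hj).symm
    have hbget : bl[j]? = some bl[j] := List.getElem?_eq_getElem hj
    have key : ∀ ans' i', i' < al.length → i' + ans' * al.length = s + j →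
        (match al[i']?, bl[j]? with
         | some ai, some bj =>
             if ai != bj then (-1 : Int)
             else pvWhileA al bl ans' (i' + 1) (j + 1)
         | _, _ => (-1 : Int)) =
        if pvCheckB al s (bl.drop j) j then (((s + bl.length - 1) / al.length + 1 : Nat) : Int)
        else (-1 : Int) := by
      intro ans' i' hi'lt hinv'
      have hget : al[i']? = some al[i'] := List.getElem?_eq_getElem hi'lt
      have hmod : (s + j) % al.length = i' := by
        rw [← hinv', Nat.add_mul_mod_self_right]
        exact Nat.mod_eq_of_lt hi'lt
      simp only [hget, hbget]
      by_cases hne : al[i'] = bl[j]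
      · have hrec := ihn (bl.length - (j + 1)) (by omega) (j + 1) rfl ans' (i' + 1)
          (by omega) (by omega) (by omega) (Or.inl (by omega))
        have hc : al[(s + j) % al.length]?.getD bl[j] = bl[j] := by
          rw [hmod, hget]; simpa using hne
        rw [hne, if_neg (by simp), hrec, hdrop]
        simp [pvCheckB, hc]
      · have hc : ¬ al[(s + j) % al.length]?.getD bl[j] = bl[j] := by
          rw [hmod, hget]; simpa using hne
        rw [if_pos (by simpa using hne), hdrop]
        simp [pvCheckB, hc]
    rw [pvWhileA]
    by_cases hwrap : i = al.length
    · have h1 : (i == al.length) = true := by simpa using hwrap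
      simp only [dif_pos hj, h1, if_true]
      refine key (ans + 1) 0 hL ?_
      have : (ans + 1) * al.length = ans * al.length + al.length := by ring
      omega
    · have h1 : (i == al.length) = false := by simpa using hwrap
      simp only [dif_pos hj, h1]
      exact key ans i (by omega) hinv
  · -- loop exit: j = bl.length
    have hjeq : j = bl.length := by omega
    rw [pvWhileA]
    simp only [dif_neg hj]
    have hdrop : bl.drop j = [] := List.drop_eq_nil_of_le (by omega)
    rw [hdrop]
    simp only [pvCheckB, if_true]
    rcases hstart with h1 | ⟨h0, ha0, hi0⟩
    · have hkey : s + bl.length - 1 = (i - 1) + ans * al.length := by omega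
      have hdiv : (s + bl.length - 1) / al.length = ans := by
        rw [hkey, Nat.add_mul_div_right _ _ hL, Nat.div_eq_of_lt (by omega)]
        omega
      rw [← hdiv]; push_cast; ring
    · have hdiv : (s + bl.length - 1) / al.length = 0 := Nat.div_eq_of_lt (by omega)
      rw [hdiv, ha0]
      norm_num

-- [c] is a prefix of al.drop n iff al[n]? = some c.
theorem singleton_prefix_drop (al : List Char) (c : Char) (n : Nat) :
    [c] <+: al.drop n ↔ al[n]? = some c := by
  rw [← List.head?_drop]
  cases al.drop n with
  | nil => simp
  | cons x xs => simp [List.cons_prefix_cons, eq_comm]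

-- find < 0 on a one-character needle iff the character does not occur.
theorem find_char_neg (al : List Char) (c : Char) :
    PySem.Chars.find al [c] < 0 ↔ c ∉ al := by
  have h := PySem.Chars.find_eq_neg_one_iff al [c]
  have h2 := PySem.Chars.neg_one_le_find al [c]
  rw [List.singleton_infix_iff] at h
  constructor
  · intro hlt hm
    exact (h.mp (by omega)) hm
  · intro hnm
    have := h.mpr hnm
    omega

-- find on a one-character needle = findIdx?-with-default pvFindB (on nonempty al).
theorem find_char_eq_pvFindB (al : List Char) (_hal : al ≠ []) (c : Char) :
    pvFindB al (some c) =
      if 0 ≤ PySem.Chars.find al [c] then (PySem.Chars.find al [c]).toNat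
      else al.length - 1 := by
  unfold pvFindB
  cases hfi : al.findIdx? (fun x => (some c : Option Char) == some x) with
  | none =>
    have hnm : c ∉ al := by
      intro hm
      have := List.findIdx?_eq_none_iff.mp hfi c hm
      simp at this
    rw [if_neg (by have := (find_char_neg al c).mpr hnm; omega)]
  | some k =>
    obtain ⟨hk, hfx⟩ := List.findIdx?_eq_some_iff_findIdx_eq.mp hfi
    dsimp only
    have hck : al[k] = c := by
      subst hfx
      have h := List.findIdx_getElem (p := fun x => (some c : Option Char) == some x)
        (xs := al) (w := hk)
      simp only [Option.some.injEq, beq_iff_eq] at h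
      exact h.symm
    have hmin : ∀ j (hj : j < k), al[j]'(by omega) ≠ c := by
      intro j hj
      have h := List.not_of_lt_findIdx (p := fun x => (some c : Option Char) == some x)
        (xs := al) (i := j) (by omega)
      intro he
      have h2 : ¬ c = al[j]'(by omega) := by simpa using h
      exact h2 he.symm
    have hmem : c ∈ al := hck ▸ List.getElem_mem hk
    have hnn : 0 ≤ PySem.Chars.find al [c] := by
      rw [PySem.Chars.find_nonneg_iff, List.singleton_infix_iff]; exact hmem
    obtain ⟨hpre, hmin'⟩ := PySem.Chars.find_spec hnn
    rw [singleton_prefix_drop] at hpre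
    have hmlt : (PySem.Chars.find al [c]).toNat < al.length := by
      by_contra hge
      rw [List.getElem?_eq_none (by omega)] at hpre
      simp at hpre
    have heq : (PySem.Chars.find al [c]).toNat = k := by
      rcases Nat.lt_trichotomy (PySem.Chars.find al [c]).toNat k with hlt | he | hgt
      · have hv : al[(PySem.Chars.find al [c]).toNat] = c := by
          rw [List.getElem?_eq_getElem hmlt] at hpre
          exact Option.some.inj hpre
        exact absurd hv (hmin _ hlt)
      · exact he
      · exact absurd ((singleton_prefix_drop al c k).mpr
          (by rw [List.getElem?_eq_getElem hk, hck])) (hmin' k hgt)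
    rw [if_pos hnn, heq]

-- indexing the flattened replicate is modular indexing.
theorem flat_replicate_get (al : List Char) (hal : al ≠ []) :
    ∀ (q i : Nat), i < q * al.length →
      ((List.replicate q al).flatten)[i]? = al[i % al.length]? := by
  have hL : 0 < al.length := List.length_pos_iff.mpr hal
  intro q
  induction q with
  | zero => intro i hi; omega
  | succ q ih =>
    intro i hi
    rw [List.replicate_succ, List.flatten_cons]
    by_cases hlt : i < al.length
    · rw [List.getElem?_append_left hlt, Nat.mod_eq_of_lt hlt]
    · rw [List.getElem?_append_right (by omega)]
      rw [Nat.mod_eq_sub_mod (by omega)]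
      refine ih (i - al.length) ?_
      have : (q + 1) * al.length = q * al.length + al.length := by ring
      omega

theorem flat_replicate_length (al : List Char) (q : Nat) :
    ((List.replicate q al).flatten).length = q * al.length := by
  simp [List.length_flatten]

-- the modular check is the pointwise statement.
theorem pvCheckB_iff (al : List Char) (hal : al ≠ []) (s : Nat) :
    ∀ (l : List Char) (k : Nat),
      pvCheckB al s l k = true ↔
        ∀ m (h : m < l.length), al[(s + k + m) % al.length]? = some l[m] := by
  have hL : 0 < al.length := List.length_pos_iff.mpr hal
  intro l
  induction l with
  | nil => intro k; simp [pvCheckB]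
  | cons c rest ih =>
    intro k
    have hmod : (s + k) % al.length < al.length := Nat.mod_lt _ hL
    have hgetD : al.getD ((s + k) % al.length) c = al[(s + k) % al.length] :=
      List.getD_eq_getElem al c hmod
    constructor
    · intro hc m hm
      rw [pvCheckB, Bool.and_eq_true, beq_iff_eq] at hc
      obtain ⟨h1, h2⟩ := hc
      match m with
      | 0 =>
        simp only [Nat.add_zero, List.getElem_cons_zero]
        rw [List.getElem?_eq_getElem hmod, ← hgetD, h1]
      | Nat.succ m' =>
        have hh := (ih (k + 1)).mp h2 m' (by simpa using hm)
        have harith : s + (k + 1) + m' = s + k + (m' + 1) := by omega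
        rw [harith] at hh
        simpa using hh
    · intro hp
      rw [pvCheckB, Bool.and_eq_true, beq_iff_eq]
      constructor
      · have h0 := hp 0 (by simp)
        simp only [Nat.add_zero, List.getElem_cons_zero] at h0
        rw [List.getElem?_eq_getElem hmod] at h0
        rw [hgetD]
        exact Option.some.inj h0
      · rw [ih (k + 1)]
        intro m' hm'
        have hh := hp (m' + 1) (by simpa using hm')
        have harith : s + k + (m' + 1) = s + (k + 1) + m' := by omega
        rw [harith] at hh
        simpa using hh

-- ceiling division -(-(s+lb) // la) equals the closed form (s+lb-1)/la + 1 (Nat).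
theorem ceil_eq (s lb la : Nat) (hla : 0 < la) (hlb : 0 < lb) :
    -(PySem.Int.floordiv (-((s : Int) + (lb : Int))) (la : Int)) =
      (((s + lb - 1) / la + 1 : Nat) : Int) := by
  rw [PySem.Int.neg_floordiv_neg_eq_iff_of_pos (by exact_mod_cast hla)]
  have g1 : (s + lb - 1) / la * la ≤ s + lb - 1 := Nat.div_mul_le_self _ _
  have g2 : s + lb - 1 < ((s + lb - 1) / la + 1) * la := by
    have h1 := Nat.div_add_mod (s + lb - 1) la
    have h2 := Nat.mod_lt (s + lb - 1) hla
    have h3 : ((s + lb - 1) / la + 1) * la = la * ((s + lb - 1) / la) + la := by ring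
    omega
  constructor
  · have hc : ((((s + lb - 1) / la + 1 : Nat) : Int) - 1) = (((s + lb - 1) / la : Nat) : Int) := by
      push_cast; ring
    rw [hc]
    exact_mod_cast (by omega : (s + lb - 1) / la * la < s + lb)
  · exact_mod_cast (by omega : s + lb ≤ ((s + lb - 1) / la + 1) * la)

-- a take-of-drop equals bl iff the pointwise indexing statement.
theorem take_drop_eq_iff (t bl : List Char) (sN : Nat) (_h : sN + bl.length ≤ t.length) :
    (t.drop sN).take bl.length = bl ↔ ∀ m (hm : m < bl.length), t[sN + m]? = some bl[m] := by
  constructor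
  · intro he m hm
    have hx : ((t.drop sN).take bl.length)[m]? = bl[m]? := by rw [he]
    rw [List.getElem?_take, if_pos hm, List.getElem?_drop] at hx
    rw [hx]
    exact List.getElem?_eq_getElem hm
  · intro hp
    apply List.ext_getElem?
    intro n
    rw [List.getElem?_take, List.getElem?_drop]
    by_cases hn : n < bl.length
    · rw [if_pos hn, hp n hn, List.getElem?_eq_getElem hn]
    · rw [if_neg hn]
      exact (List.getElem?_eq_none (by omega)).symm

-- ===== VERDICT (by name: the statement is the Claim_ definition above) =====
theorem minRepeats_spec : Claim_equal_minRepeats := by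
  intro a b _ hpre
  unfold Spec_minRepeats minRepeats minRepeats_alt
  by_cases hal : a.toList = []
  · simp [hal, pvScanA]
  · have hLpos : 0 < a.toList.length := List.length_pos_iff.mpr hal
    have hbl : b.toList ≠ [] := by
      rcases hpre with h | h
      · exact absurd h hal
      · exact h
    obtain ⟨b0, btl, hbe⟩ : ∃ b0 btl, b.toList = b0 :: btl := by
      cases hb : b.toList with
      | nil => exact absurd hb hbl
      | cons x xs => exact ⟨x, xs, rfl⟩
    have hget : PySem.Str.pyGet? b 0 = some b0 := by
      rw [PySem.Str.pyGet?_eq, hbe]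
      simp [PySem.Chars.pyGet?, PySem.List.pyGet?, PySem.List.pyIdx?]
    have hscan : pvScanA (some b0) a.toList 0 = pvFindB a.toList (some b0) := by
      simpa using pvScanA_eq_find (some b0) a.toList hal 0
    have hslt := pvFindB_lt a.toList hal (some b0)
    have hfind : PySem.Str.find a (String.singleton b0) = PySem.Chars.find a.toList [b0] := by
      rw [PySem.Str.find_eq, String.toList_singleton]
    rw [hget]
    simp only [hscan, List.isEmpty_iff, hal, if_false, hfind, PySem.Str.len_eq]
    rw [if_neg (by simp only [beq_iff_eq]; omega)]
    rw [pvWhileA_eq a.toList b.toList (pvFindB a.toList (some b0)) hal hslt 0 0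
      (pvFindB a.toList (some b0)) (by omega) (by omega) (by omega) (Or.inr ⟨rfl, rfl, rfl⟩),
      List.drop_zero]
    by_cases hneg : PySem.Chars.find a.toList [b0] < 0
    · -- b0 does not occur in a: both sides are -1
      have hnm : b0 ∉ a.toList := (find_char_neg a.toList b0).mp hneg
      have hsv : pvFindB a.toList (some b0) = a.toList.length - 1 := by
        rw [find_char_eq_pvFindB a.toList hal b0, if_neg (by omega)]
      have hchk : pvCheckB a.toList (a.toList.length - 1) b.toList 0 = false := by
        by_contra hc
        rw [Bool.not_eq_false, hbe, pvCheckB, Bool.and_eq_true, beq_iff_eq] at hc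
        obtain ⟨h1, -⟩ := hc
        rw [Nat.add_zero, List.getD_eq_getElem a.toList b0 (Nat.mod_lt _ hLpos)] at h1
        exact hnm (h1 ▸ List.getElem_mem _)
      rw [hsv, hchk, if_pos hneg]
      simp
    · -- b0 occurs at index sN := toNat of find
      have hnn : 0 ≤ PySem.Chars.find a.toList [b0] := by omega
      set f := PySem.Chars.find a.toList [b0] with hf
      set sN := f.toNat with hsN
      have hfv : f = (sN : Int) := by omega
      have hsv : pvFindB a.toList (some b0) = sN := by
        rw [find_char_eq_pvFindB a.toList hal b0, if_pos hnn]
      have hslt' : sN < a.toList.length := by rw [← hsv]; exact hslt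
      have hlbpos : 0 < b.toList.length := by rw [hbe]; simp
      set F := (sN + b.toList.length - 1) / a.toList.length + 1 with hF
      have hceil : -(PySem.Int.floordiv (-(f + (b.toList.length : Int)))
          (a.toList.length : Int)) = (F : Int) := by
        rw [hfv]; exact ceil_eq sN b.toList.length a.toList.length hLpos hlbpos
      have hbound : sN + b.toList.length ≤ F * a.toList.length := by
        have h1 := Nat.div_add_mod (sN + b.toList.length - 1) a.toList.length
        have h2 := Nat.mod_lt (sN + b.toList.length - 1) hLpos
        have h3 : F * a.toList.length =
            a.toList.length * ((sN + b.toList.length - 1) / a.toList.length) + a.toList.length := by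
          rw [hF]; ring
        omega
      rw [if_neg hneg, hceil]
      have htn : ((F : Int)).toNat = F := Int.toNat_natCast F
      rw [htn]
      set t := (List.replicate F a.toList).flatten with ht
      have htlen : t.length = F * a.toList.length := flat_replicate_length a.toList F
      have hslice : PySem.List.slice t (some f) (some (f + (b.toList.length : Int))) =
          (t.drop sN).take b.toList.length := by
        rw [hfv]
        exact PySem.List.slice_natCast_add t sN b.toList.length
      have hiff : (t.drop sN).take b.toList.length = b.toList ↔
          pvCheckB a.toList sN b.toList 0 = true := by
        rw [take_drop_eq_iff t b.toList sN (by omega),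
          pvCheckB_iff a.toList hal sN b.toList 0]
        constructor
        · intro hp m hm
          have hq := hp m hm
          rw [flat_replicate_get a.toList hal F (sN + m) (by omega)] at hq
          rw [Nat.add_zero]
          exact hq
        · intro hp m hm
          have hq := hp m hm
          rw [Nat.add_zero] at hq
          rw [flat_replicate_get a.toList hal F (sN + m) (by omega)]
          exact hq
      rw [hsv]
      by_cases hchk : pvCheckB a.toList sN b.toList 0 = true
      · rw [if_pos hchk, hslice]
        rw [if_pos (by simpa using hiff.mpr hchk)]
      · rw [if_neg hchk, hslice]
        rw [if_neg (by intro hc; exact hchk (hiff.mp (by simpa using hc)))]
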